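-- pv_equiv track=rewrite | github.com/GuptajiRocks/data-science-sem4 | Practical/feb03/test.py | create_one_hot_encoding
-- ===== SOURCE A (Python) =====
-- def create_one_hot_encoding(transactions):
--     unique_items = sorted(list(set(item for transaction in transactions for item in transaction)))
--     item_map = {item: idx for idx, item in enumerate(unique_items)}
--     binary_data = []
--
--     for transaction in transactions:
--         row = [0] * len(unique_items)
--         for item in transaction:
--             row[item_map[item]] = 1
--         binary_data.append(row)
--
--     return binary_data, item_map
-- ===== SOURCE B (Python) =====
-- def create_one_hot_encoding(transactions):
--     unique_items = sorted(set(item for transaction in transactions for item in transaction))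
--     item_map = {item: idx for idx, item in enumerate(unique_items)}
--     n = len(unique_items)
--     binary_data = []
--     for transaction in transactions:
--         positions = sorted(item_map[item] for item in set(transaction))
--         row = []
--         prev = 0
--         for j in positions:
--             row.extend([0] * (j - prev))
--             row.append(1)
--             prev = j + 1
--         row.extend([0] * (n - prev))
--         binary_data.append(row)
--     return binary_data, item_map
-- ===== Notes on version B (the rewrite author's own statement) =====
-- stated objective: alternative
-- what changed: Each row is built by run-length construction: sort the distinct items' column positions and emit runs of zeros between consecutive 1s, instead of preallocating a zero row and scattering 1s at item_map indices while looping over the transaction.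
import Mathlib
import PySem

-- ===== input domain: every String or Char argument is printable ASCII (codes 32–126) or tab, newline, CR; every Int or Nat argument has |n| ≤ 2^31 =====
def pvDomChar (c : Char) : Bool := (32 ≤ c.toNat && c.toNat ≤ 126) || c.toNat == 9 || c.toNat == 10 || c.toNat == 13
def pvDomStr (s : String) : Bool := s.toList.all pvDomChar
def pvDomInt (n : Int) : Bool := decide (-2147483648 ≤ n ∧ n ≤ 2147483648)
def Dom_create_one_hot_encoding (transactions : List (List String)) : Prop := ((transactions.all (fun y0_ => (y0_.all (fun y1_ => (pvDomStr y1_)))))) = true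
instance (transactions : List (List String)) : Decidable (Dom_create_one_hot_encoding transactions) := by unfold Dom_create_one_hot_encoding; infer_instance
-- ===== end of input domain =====

-- B builds each row from the sorted positions of the transaction's distinct items, emitting runs of zeros
-- between consecutive 1s, instead of scattering 1s into a preallocated zero row (alternative algorithm).

-- ===== PORT A =====
def create_one_hot_encoding (transactions : List (List String)) : List (List Int) × (List (String × Int)) :=
  let unique_items := PySem.List.sorted (PySem.Set.ofList (transactions.flatMap (fun t => t))) (fun x => x) false
  let item_map := (PySem.List.enumerate unique_items 0).foldl (fun d p => d.insert p.2 p.1) PySem.Dict.empty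
  let binary_data := transactions.foldl (fun acc transaction =>
      acc ++ [transaction.foldl (fun row item => PySem.List.pySetD row (item_map.getD item 0) 1)
               (List.replicate unique_items.length 0)]) []
  (binary_data, item_map.items)

-- ===== PORT B =====
def create_one_hot_encoding_alt (transactions : List (List String)) : List (List Int) × (List (String × Int)) :=
  let unique_items := PySem.List.sorted (PySem.Set.ofList (transactions.flatMap (fun t => t))) (fun x => x) false
  let item_map := (PySem.List.enumerate unique_items 0).foldl (fun d p => d.insert p.2 p.1) PySem.Dict.empty
  let n := PySem.List.len unique_items
  let binary_data := transactions.foldl (fun acc transaction =>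
    let positions := PySem.List.sorted ((PySem.Set.ofList transaction).map (fun item => item_map.getD item 0)) (fun x => x) false
    let st := positions.foldl (fun (st : List Int × Int) j =>
        (st.1 ++ List.replicate (j - st.2).toNat 0 ++ [1], j + 1)) ([], 0)
    acc ++ [st.1 ++ List.replicate (n - st.2).toNat 0]) []
  (binary_data, item_map.items)

-- ===== PRECONDITION & SPEC =====
def Spec_create_one_hot_encoding (transactions : List (List String)) (out : List (List Int) × (List (String × Int))) : Prop := out = create_one_hot_encoding_alt transactions
instance (transactions : List (List String)) (out : List (List Int) × (List (String × Int))) : Decidable (Spec_create_one_hot_encoding transactions out) := by unfold Spec_create_one_hot_encoding; infer_instance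

-- ===== CLAIM (what is proved, stated in full; the proofs are below) =====
def Claim_equal_create_one_hot_encoding : Prop := ∀ (transactions : List (List String)), Dom_create_one_hot_encoding transactions → Spec_create_one_hot_encoding transactions (create_one_hot_encoding transactions)

-- ===== LEMMAS AND PROOFS =====

def myRange (a b : Int) : List Int := (List.range (b - a).toNat).map (fun (k : Nat) => a + (k : Int))

theorem myRange_len (a b : Int) : (myRange a b).length = (b - a).toNat := by simp [myRange]

theorem mem_myRange {a b x : Int} : x ∈ myRange a b ↔ a ≤ x ∧ x < b := by
  unfold myRange
  constructor
  · intro h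
    obtain ⟨k, hk, rfl⟩ := List.mem_map.mp h
    have := List.mem_range.mp hk
    omega
  · intro h
    exact List.mem_map.mpr ⟨(x - a).toNat, List.mem_range.mpr (by omega), by omega⟩

theorem myRange_split {a c b : Int} (h1 : a ≤ c) (h2 : c ≤ b) :
    myRange a b = myRange a c ++ myRange c b := by
  unfold myRange
  have hsum : (b - a).toNat = (c - a).toNat + (b - c).toNat := by omega
  rw [hsum, List.range_add, List.map_append, List.map_map]
  congr 1
  apply List.map_congr_left
  intro k hk
  simp only [Function.comp_apply]
  push_cast
  omega

theorem myRange_single (j : Int) : myRange j (j + 1) = [j] := by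
  simp [myRange]

theorem map_const_myRange (a b : Int) (c : Int) :
    (myRange a b).map (fun _ => c) = List.replicate (b - a).toNat c := by
  rw [List.map_const', myRange_len]

theorem pv_fill (V : Int) : ∀ (idxs : List Int) (prev : Int) (acc : List Int),
    idxs.Pairwise (· < ·) → (∀ j ∈ idxs, prev ≤ j ∧ j < V) → prev ≤ V →
    (idxs.foldl (fun (st : List Int × Int) j =>
        (st.1 ++ List.replicate (j - st.2).toNat 0 ++ [1], j + 1)) (acc, prev)).1
      ++ List.replicate (V - (idxs.foldl (fun (st : List Int × Int) j =>
        (st.1 ++ List.replicate (j - st.2).toNat 0 ++ [1], j + 1)) (acc, prev)).2).toNat 0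
    = acc ++ (myRange prev V).map (fun j => if j ∈ idxs then (1 : Int) else 0) := by
  intro idxs
  induction idxs with
  | nil =>
    intro prev acc _ _ _
    simp [← map_const_myRange prev V (0 : Int)]
  | cons j0 rest ih =>
    intro prev acc hpw hb hpV
    have hj0 : prev ≤ j0 ∧ j0 < V := hb j0 (List.mem_cons_self ..)
    rw [List.foldl_cons]
    rw [ih (j0 + 1) (acc ++ List.replicate (j0 - prev).toNat 0 ++ [1])
        (List.Pairwise.sublist (List.sublist_cons_self ..) hpw)
        (fun j hj => ⟨by have := (List.pairwise_cons.mp hpw).1 j hj; omega, (hb j (List.mem_cons_of_mem _ hj)).2⟩)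
        (by omega)]
    rw [myRange_split hj0.1 (by omega : j0 ≤ V), myRange_split (by omega : j0 ≤ j0 + 1) (by omega : j0 + 1 ≤ V),
        myRange_single]
    have h1 : (myRange prev j0).map (fun j => if j ∈ j0 :: rest then (1 : Int) else 0)
        = List.replicate (j0 - prev).toNat 0 := by
      rw [← map_const_myRange prev j0 (0 : Int)]
      apply List.map_congr_left
      intro k hk
      have hk' := mem_myRange.mp hk
      have : k ∉ j0 :: rest := by
        intro hmem
        rcases List.mem_cons.mp hmem with h | h
        · omega
        · have := (List.pairwise_cons.mp hpw).1 k h; omega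
      simp [this]
    have h3 : (myRange (j0 + 1) V).map (fun j => if j ∈ j0 :: rest then (1 : Int) else 0)
        = (myRange (j0 + 1) V).map (fun j => if j ∈ rest then (1 : Int) else 0) := by
      apply List.map_congr_left
      intro k hk
      have hk' := mem_myRange.mp hk
      have : (k ∈ j0 :: rest) ↔ (k ∈ rest) := by
        rw [List.mem_cons]
        constructor
        · rintro (rfl | h)
          · exact absurd hk'.1 (by omega)
          · exact h
        · exact Or.inr
      simp [this]
    simp only [List.map_append, h1, h3, List.map_cons, List.map_nil]
    simp [List.append_assoc]

theorem pv_rowB (U : List String) (hU : U.Nodup) (m : PySem.Dict String Int)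
    (hm : ∀ x ∈ U, m.getD x 0 = (U.idxOf x : Int)) (t : List String) (hsub : ∀ x ∈ t, x ∈ U) :
    ((PySem.List.sorted ((PySem.Set.ofList t).map (fun item => m.getD item 0)) (fun x => x) false).foldl
        (fun (st : List Int × Int) j => (st.1 ++ List.replicate (j - st.2).toNat 0 ++ [1], j + 1)) ([], 0)).1
      ++ List.replicate ((PySem.List.len U) - ((PySem.List.sorted ((PySem.Set.ofList t).map (fun item => m.getD item 0)) (fun x => x) false).foldl
        (fun (st : List Int × Int) j => (st.1 ++ List.replicate (j - st.2).toNat 0 ++ [1], j + 1)) ([], 0)).2).toNat 0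
    = U.map (fun u => if u ∈ t then (1 : Int) else 0) := by
  set P := PySem.List.sorted ((PySem.Set.ofList t).map (fun item => m.getD item 0)) (fun x => x) false with hPdef
  have hmemP : ∀ j : Int, j ∈ P ↔ ∃ u ∈ t, (U.idxOf u : Int) = j := by
    intro j
    rw [hPdef, PySem.List.mem_sorted, List.mem_map]
    constructor
    · rintro ⟨u, hu, rfl⟩
      have hu' : u ∈ t := (PySem.Set.mem_ofList _ _).mp hu
      exact ⟨u, hu', (hm u (hsub u hu')).symm⟩
    · rintro ⟨u, hu, rfl⟩
      exact ⟨u, (PySem.Set.mem_ofList _ _).mpr hu, hm u (hsub u hu)⟩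
  have hb : ∀ j ∈ P, (0 : Int) ≤ j ∧ j < PySem.List.len U := by
    intro j hj
    obtain ⟨u, hu, rfl⟩ := (hmemP j).mp hj
    have := List.idxOf_lt_length_of_mem (hsub u hu)
    rw [PySem.List.len_eq]
    omega
  have hinj : ∀ x ∈ PySem.Set.ofList t, ∀ y ∈ PySem.Set.ofList t,
      m.getD x 0 = m.getD y 0 → x = y := by
    intro x hx y hy hxy
    have hx' : x ∈ U := hsub x ((PySem.Set.mem_ofList _ _).mp hx)
    have hy' : y ∈ U := hsub y ((PySem.Set.mem_ofList _ _).mp hy)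
    rw [hm x hx', hm y hy'] at hxy
    have hxy' : U.idxOf x = U.idxOf y := by exact_mod_cast hxy
    calc x = U[U.idxOf x]'(List.idxOf_lt_length_of_mem hx') := (List.getElem_idxOf _).symm
      _ = U[U.idxOf y]'(List.idxOf_lt_length_of_mem hy') := by simp_rw [hxy']
      _ = y := List.getElem_idxOf _
  have hnodupP : P.Nodup := by
    rw [hPdef]
    exact ((PySem.List.sorted_perm ..).nodup_iff).mpr
      ((PySem.Set.nodup_ofList t).map_on hinj)
  have hpw : P.Pairwise (· < ·) := by
    have hle : P.Pairwise (· ≤ ·) := by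
      simpa using PySem.List.sorted_pairwise ((PySem.Set.ofList t).map (fun item => m.getD item 0)) (fun x => x)
    exact hle.imp₂ (fun a b hab hne => lt_of_le_of_ne hab hne) hnodupP
  rw [pv_fill (PySem.List.len U) P 0 [] hpw hb (by rw [PySem.List.len_eq]; positivity), List.nil_append]
  apply List.ext_getElem
  · simp [myRange_len, PySem.List.len_eq]
  · intro k h1 h2
    have hkU : k < U.length := by simpa using h2
    have hgetm : (myRange 0 (PySem.List.len U))[k]'(by simpa [myRange_len, PySem.List.len_eq] using hkU) = (k : Int) := by
      simp [myRange]
    simp only [List.getElem_map, hgetm]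
    have hiff : ((k : Int) ∈ P) ↔ U[k] ∈ t := by
      rw [hmemP]
      constructor
      · rintro ⟨u, hu, he⟩
        have hk : U.idxOf u = k := by exact_mod_cast he
        subst hk
        rw [List.getElem_idxOf]
        exact hu
      · intro h
        refine ⟨U[k], h, ?_⟩
        have : U.idxOf U[k] = k := List.Nodup.idxOf_getElem hU k hkU
        exact_mod_cast this
    by_cases hc : (k : Int) ∈ P
    · rw [if_pos hc, if_pos (hiff.mp hc)]
    · rw [if_neg hc, if_neg (fun h => hc (hiff.mpr h))]


theorem pv_getD_enum (U : List String) (hU : U.Nodup) (x : String) (hx : x ∈ U) :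
    ((PySem.List.enumerate U 0).foldl (fun d p => d.insert p.2 p.1) PySem.Dict.empty).getD x 0
      = (U.idxOf x : Int) := by
  have hitems : ((PySem.List.enumerate U 0).foldl (fun d p => d.insert p.2 p.1) PySem.Dict.empty).items
      = (PySem.List.enumerate U 0).map (fun p => (p.2, p.1)) := by
    have h := PySem.Dict.items_foldl_insert_fresh (l := PySem.List.enumerate U 0)
      (k := fun p : Int × String => p.2) (v := fun p : Int × String => p.1)
      (d := PySem.Dict.empty)
      (by intro a _; simp [PySem.Dict.contains_empty])
      (by simpa [PySem.List.map_snd_enumerate] using hU)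
    simpa using h
  have hkeys : ((PySem.List.enumerate U 0).foldl (fun d p => d.insert p.2 p.1) PySem.Dict.empty).keys.Nodup := by
    simp only [PySem.Dict.keys, hitems, List.map_map]
    simpa [Function.comp_def, PySem.List.map_snd_enumerate] using hU
  have hlt : U.idxOf x < U.length := List.idxOf_lt_length_of_mem hx
  have hmem : (x, (U.idxOf x : Int)) ∈ ((PySem.List.enumerate U 0).foldl (fun d p => d.insert p.2 p.1) PySem.Dict.empty).items := by
    rw [hitems]
    refine List.mem_map.mpr ⟨((U.idxOf x : Int), x), ?_, rfl⟩
    rw [PySem.List.mem_enumerate_iff]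
    exact ⟨U.idxOf x, hlt, by simp [List.getElem_idxOf]⟩
  exact PySem.Dict.getD_of_mem_items _ hmem hkeys 0

theorem pv_set_step (U : List String) (hU : U.Nodup) (s : List String) (x : String) (hx : x ∈ U) :
    (U.map (fun u => if u ∈ s then (1 : Int) else 0)).set (U.idxOf x) 1
      = U.map (fun u => if u ∈ x :: s then (1 : Int) else 0) := by
  have hlt : U.idxOf x < U.length := List.idxOf_lt_length_of_mem hx
  apply List.ext_getElem
  · simp
  · intro j h1 h2
    have hjU : j < U.length := by simpa using h2
    simp only [List.getElem_set, List.getElem_map]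
    by_cases hj : j = U.idxOf x
    · subst hj
      simp [List.getElem_idxOf, List.mem_cons]
    · have hne : U[j] ≠ x := by
        intro he
        apply hj
        have : U[j] = U[U.idxOf x] := by rw [List.getElem_idxOf, he]
        exact hU.getElem_inj_iff.mp this
      have hj' : ¬ U.idxOf x = j := fun h => hj h.symm
      simp [hj', List.mem_cons, hne]

theorem pv_scatter (U : List String) (hU : U.Nodup)
    (m : PySem.Dict String Int) (hm : ∀ x ∈ U, m.getD x 0 = (U.idxOf x : Int)) :
    ∀ (t s : List String), (∀ x ∈ t, x ∈ U) →
      t.foldl (fun row item => PySem.List.pySetD row (m.getD item 0) 1)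
          (U.map (fun u => if u ∈ s then (1 : Int) else 0))
        = U.map (fun u => if u ∈ s ∨ u ∈ t then (1 : Int) else 0) := by
  intro t
  induction t with
  | nil => intro s _; simp
  | cons x t ih =>
    intro s ht
    have hx : x ∈ U := ht x (List.mem_cons_self ..)
    rw [List.foldl_cons, hm x hx, PySem.List.pySetD_natCast, pv_set_step U hU s x hx,
        ih (x :: s) (fun y hy => ht y (List.mem_cons_of_mem _ hy))]
    apply List.map_congr_left
    intro u _
    have : (u ∈ x :: s ∨ u ∈ t) ↔ (u ∈ s ∨ u ∈ x :: t) := by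
      simp [List.mem_cons]; tauto
    simp only [this]

-- ===== VERDICT (by name: the statement is the Claim_ definition above) =====
theorem create_one_hot_encoding_spec : Claim_equal_create_one_hot_encoding := by
  intro ts _
  unfold Spec_create_one_hot_encoding create_one_hot_encoding create_one_hot_encoding_alt
  simp only []
  set U := PySem.List.sorted (PySem.Set.ofList (ts.flatMap fun t => t)) (fun x => x) false with hUdef
  set m := (PySem.List.enumerate U 0).foldl (fun d p => d.insert p.2 p.1) PySem.Dict.empty with hmdef
  have hU : U.Nodup := (PySem.List.sorted_perm ..).nodup_iff.mpr (PySem.Set.nodup_ofList _)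
  have hm : ∀ x ∈ U, m.getD x 0 = (U.idxOf x : Int) := fun x hx => pv_getD_enum U hU x hx
  refine Prod.ext ?_ rfl
  rw [PySem.List.foldl_append_singleton_eq_map, PySem.List.foldl_append_singleton_eq_map]
  apply List.map_congr_left
  intro t ht
  have hsub : ∀ x ∈ t, x ∈ U := by
    intro x hx
    rw [hUdef, PySem.List.mem_sorted, PySem.Set.mem_ofList]
    exact List.mem_flatMap.mpr ⟨t, ht, hx⟩
  have hrep : List.replicate U.length (0 : Int)
      = U.map (fun u => if u ∈ ([] : List String) then (1 : Int) else 0) := by simp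
  rw [hrep, pv_scatter U hU m hm t [] hsub, pv_rowB U hU m hm t hsub]
  apply List.map_congr_left
  intro u _
  simp
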